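-- pv_equiv track=rewrite | github.com/eeue56/PyGeo2 | pygeo/utils/utils.py | permrange
-- ===== SOURCE A (Python) =====
-- def permrange(e,n=None):
--    I=[]
--    def perms(source,done,current=[]):
--       if done == len(source):
--          if current[0] < current[-1]:
--             I.append(current)
--       else:
--          for s in source:
--             if s not in current:
--                 perms(source,done+1,current+[s])
--       if  len(I):
--          return I
--    source=range(e)
--    if not n:
--       done = 0
--    else:
--       done=e-n
--
--    if n == 0:
--       return []
--
--    if n == 1:
--       for s in source:
--          I.append([s])
--    else:
--       perms(source,done)
--    return I
-- ===== SOURCE B (Python) =====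
-- def permrange(e, n=None):
--     if n == 0:
--         return []
--     if n == 1:
--         return [[s] for s in range(e)]
--     length = e if n is None else n
--     if length < 0 or length > e:
--         return []
--     prefixes = [[]]
--     for _ in range(length):
--         prefixes = [p + [s] for p in prefixes for s in range(e) if s not in p]
--     return [p for p in prefixes if p and p[0] < p[-1]]
-- ===== Notes on version B (the rewrite author's own statement) =====
-- stated objective: alternative
-- what changed: A's recursive DFS backtracking with a mutated closure list is replaced by an iterative level-by-level (breadth-first) expansion of prefix lists followed by a single first<last filter pass; Pre_ excludes only the inputs where A raises IndexError.
import Mathlib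
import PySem

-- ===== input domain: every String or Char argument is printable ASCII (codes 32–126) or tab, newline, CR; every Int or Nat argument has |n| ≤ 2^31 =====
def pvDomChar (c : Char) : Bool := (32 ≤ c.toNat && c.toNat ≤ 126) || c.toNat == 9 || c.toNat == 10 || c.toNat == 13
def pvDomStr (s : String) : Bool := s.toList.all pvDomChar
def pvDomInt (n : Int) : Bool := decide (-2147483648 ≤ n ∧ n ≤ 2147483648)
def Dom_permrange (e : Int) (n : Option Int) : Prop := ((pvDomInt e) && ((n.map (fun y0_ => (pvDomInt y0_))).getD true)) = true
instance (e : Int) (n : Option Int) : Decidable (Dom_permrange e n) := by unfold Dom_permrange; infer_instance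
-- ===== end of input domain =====

-- ===== PORT A =====
-- B replaces A's recursive DFS backtracking by an iterative level-by-level prefix expansion (alternative decomposition, same cost).

-- fuel is a totality guard only: the caller supplies source.length + 1, which the proofs show is never exhausted
def permsA (source : List Int) (fuel : Nat) (done : Int) (current : List Int) (acc : List (List Int)) : List (List Int) :=
  match fuel with
  | 0 => acc
  | fuel + 1 =>
    if done = (source.length : Int) then
      -- Python: current[0] < current[-1]; pyGet? = none means IndexError (excluded by Pre_)
      match PySem.List.pyGet? current 0, PySem.List.pyGet? current (-1) with
      | some a, some b => if a < b then acc ++ [current] else acc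
      | _, _ => acc
    else
      source.foldl (fun a s => if s ∈ current then a else permsA source fuel (done + 1) (current ++ [s]) a) acc

def permrange (e : Int) (n : Option Int) : List (List Int) :=
  let source := PySem.List.pyRange 0 e 1
  let done : Int := match n with | none => 0 | some k => if k = 0 then 0 else e - k
  if n = some 0 then []
  else if n = some 1 then source.foldl (fun I s => I ++ [[s]]) []
  else permsA source (source.length + 1) done [] []

-- ===== PORT B =====
-- main branch of B (the level-by-level prefix expansion), as a named helper
def permrangeAltMain (e length : Int) : List (List Int) :=
  if length < 0 ∨ length > e then []
  else
    let prefixes := (PySem.List.pyRange 0 length 1).foldl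
      (fun ps _ => ps.flatMap (fun p =>
        (PySem.List.pyRange 0 e 1).filterMap (fun s => if s ∈ p then none else some (p ++ [s]))))
      [[]]
    prefixes.filter (fun p =>
      match PySem.List.pyGet? p 0, PySem.List.pyGet? p (-1) with
      | some a, some b => decide (a < b)
      | _, _ => false)

def permrange_alt (e : Int) (n : Option Int) : List (List Int) :=
  if n = some 0 then []
  else if n = some 1 then (PySem.List.pyRange 0 e 1).map (fun s => [s])
  else permrangeAltMain e (match n with | none => e | some k => k)

-- ===== PRECONDITION & SPEC =====
-- Pre_ excludes exactly the inputs where Python A raises IndexError (current[0] on the empty prefix):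
-- n is None with e <= 0, or n == e < 0.
def Pre_permrange (e : Int) (n : Option Int) : Prop :=
  ¬((n = none ∧ e ≤ 0) ∨ (n = some e ∧ e < 0))
instance (e : Int) (n : Option Int) : Decidable (Pre_permrange e n) := by unfold Pre_permrange; infer_instance
def pvWitness_permrange : Int × Option Int := (4, some 2)

def Spec_permrange (e : Int) (n : Option Int) (out : List (List Int)) : Prop := out = permrange_alt e n
instance (e : Int) (n : Option Int) (out : List (List Int)) : Decidable (Spec_permrange e n out) := by unfold Spec_permrange; infer_instance

-- ===== CLAIM (what is proved, stated in full; the proofs are below) =====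
def Claim_equal_permrange : Prop := ∀ (e : Int) (n : Option Int), Dom_permrange e n → Pre_permrange e n → Spec_permrange e n (permrange e n)

-- ===== LEMMAS AND PROOFS =====

-- proof-only helpers -------------------------------------------------------
def pvGood : List Int → Bool := fun p =>
  match PySem.List.pyGet? p 0, PySem.List.pyGet? p (-1) with
  | some a, some b => decide (a < b)
  | _, _ => false

def pvExt (source : List Int) : Nat → List Int → List (List Int)
  | 0, c => [c]
  | k+1, c => (source.filter (fun s => !decide (s ∈ c))).flatMap (fun s => pvExt source k (c ++ [s]))

def pvAvail (source c : List Int) : Nat := (source.filter (fun s => !decide (s ∈ c))).length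

def pvStep (source : List Int) (ps : List (List Int)) : List (List Int) :=
  ps.flatMap (fun p => (source.filter (fun s => !decide (s ∈ p))).map (fun s => p ++ [s]))

-- generic list lemmas -------------------------------------------------------
theorem pv_foldl_id {α β : Type} (g : β → α → β) (h : ∀ a s, g a s = a) :
    ∀ (l : List α) (acc : β), l.foldl g acc = acc := by
  intro l; induction l with
  | nil => intro acc; rfl
  | cons x t ih => intro acc; simp [List.foldl, h, ih]

theorem pv_foldl_skip_extend {α β : Type} [DecidableEq α]
    (c : List α) (F : List β → α → List β) (G : α → List β) :
    ∀ (l : List α), (∀ a s, s ∈ l → s ∉ c → F a s = a ++ G s) →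
      ∀ (acc : List β), l.foldl (fun a s => if s ∈ c then a else F a s) acc
        = acc ++ (l.filter (fun s => !decide (s ∈ c))).flatMap G := by
  intro l; induction l with
  | nil => intro _ acc; simp
  | cons x t ih =>
    intro hF acc
    by_cases hx : x ∈ c
    · simp [List.foldl, hx, ih (fun a s hs => hF a s (List.mem_cons_of_mem _ hs))]
    · simp only [List.foldl, if_neg hx]
      rw [hF acc x (List.mem_cons_self) hx,
        ih (fun a s hs => hF a s (List.mem_cons_of_mem _ hs))]
      simp [hx]

theorem pv_avail_lt {source c : List Int} {s : Int}
    (hs : s ∈ source) (hc : s ∉ c) : pvAvail source (c ++ [s]) < pvAvail source c := by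
  unfold pvAvail
  induction source with
  | nil => cases hs
  | cons x t ih =>
    have hmono : ∀ (u : List Int), (u.filter fun a => !decide (a ∈ c ++ [s])).length ≤ (u.filter fun a => !decide (a ∈ c)).length := by
      intro u
      apply List.Sublist.length_le
      apply List.monotone_filter_right
      intro a ha
      simp only [Bool.not_eq_true', decide_eq_false_iff_not] at ha ⊢
      intro h; exact ha (List.mem_append_left _ h)
    by_cases hx1 : x ∈ c
    · have hx2 : x ∈ c ++ [s] := List.mem_append_left _ hx1
      have hst : s ∈ t := by
        rcases List.mem_cons.mp hs with h | h
        · exact absurd (h ▸ hx1) hc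
        · exact h
      simpa [List.filter_cons, hx1, hx2] using ih hst
    · have h2 : (!decide (x ∈ c)) = true := by simp [hx1]
      by_cases hx2 : x ∈ c ++ [s]
      · have h1 : (!decide (x ∈ c ++ [s])) = false := by simp [hx2]
        simp only [List.filter_cons, h1, h2, if_true, Bool.false_eq_true, if_false, List.length_cons]
        have := hmono t
        omega
      · have h1 : (!decide (x ∈ c ++ [s])) = true := by simp [hx2]
        have hst : s ∈ t := by
          rcases List.mem_cons.mp hs with h | h
          · exact absurd (h ▸ (List.mem_append_right c (by simp) : s ∈ c ++ [s])) hx2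
          · exact h
        have := ih hst
        simp only [List.filter_cons, h1, h2, if_true, List.length_cons]
        omega

theorem pv_filter_flatMap {α β : Type} (l : List α) (g : α → List β) (q : β → Bool) :
    (l.flatMap g).filter q = l.flatMap (fun x => (g x).filter q) := by
  induction l with
  | nil => rfl
  | cons x t ih => simp [List.flatMap_cons, List.filter_append, ih]

theorem pv_foldl_const_iter {α β : Type} (g : β → β) :
    ∀ (l : List α) (init : β), l.foldl (fun x _ => g x) init = g^[l.length] init := by
  intro l; induction l with
  | nil => intro init; rfl
  | cons x t ih => intro init; simp [List.foldl, ih, Function.iterate_succ_apply]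

-- characterization of port A ------------------------------------------------
theorem pv_permsA_eq (source : List Int) (r : Nat) :
    ∀ (current : List Int) (acc : List (List Int)) (fuel : Nat),
      min r (pvAvail source current) + 1 ≤ fuel →
      permsA source fuel ((source.length : Int) - (r : Int)) current acc
        = acc ++ (pvExt source r current).filter pvGood := by
  induction r with
  | zero =>
    intro current acc fuel hf
    obtain ⟨f, rfl⟩ : ∃ f, fuel = f + 1 := ⟨fuel - 1, by omega⟩
    simp only [permsA, Nat.cast_zero, sub_zero, if_pos rfl, pvExt]
    unfold pvGood
    cases h0 : PySem.List.pyGet? current 0 <;> cases h1 : PySem.List.pyGet? current (-1) <;>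
        simp [List.filter, h0, h1] <;>
      split <;> rename_i hab <;> simp [hab]
  | succ r ih =>
    intro current acc fuel hf
    obtain ⟨f, rfl⟩ : ∃ f, fuel = f + 1 := ⟨fuel - 1, by omega⟩
    have hne : ((source.length : Int) - ((r : Nat) + 1 : Nat)) ≠ (source.length : Int) := by
      push_cast; omega
    simp only [permsA, if_neg hne]
    have harg : ((source.length : Int) - ((r : Nat) + 1 : Nat) + 1) = (source.length : Int) - (r : Int) := by
      push_cast; ring
    rw [harg]
    rw [pv_foldl_skip_extend current
      (fun a s => permsA source f ((source.length : Int) - (r : Int)) (current ++ [s]) a)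
      (fun s => (pvExt source r (current ++ [s])).filter pvGood)
      source
      (fun a s hs hc => by
        apply ih
        have := pv_avail_lt (c := current) hs hc
        omega)
      acc]
    rw [show (pvExt source (r+1) current) = (source.filter (fun s => !decide (s ∈ current))).flatMap (fun s => pvExt source r (current ++ [s])) from rfl]
    rw [pv_filter_flatMap]

theorem pv_permsA_far (source : List Int) :
    ∀ (fuel : Nat) (done : Int) (current : List Int) (acc : List (List Int)),
      (source.length : Int) < done →
      permsA source fuel done current acc = acc := by
  intro fuel
  induction fuel with
  | zero => intro done current acc _; rfl
  | succ f ih =>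
    intro done current acc hd
    have hne : done ≠ (source.length : Int) := by omega
    simp only [permsA, if_neg hne]
    exact pv_foldl_id _ (fun a s => by
      by_cases hs : s ∈ current
      · simp [hs]
      · simp [hs, ih (done + 1) (current ++ [s]) a (by omega)]) source acc

-- characterization of port B ------------------------------------------------
theorem pv_filterMap_if (p : List Int) (l : List Int) :
    l.filterMap (fun s => if s ∈ p then none else some (p ++ [s]))
      = (l.filter (fun s => !decide (s ∈ p))).map (fun s => p ++ [s]) := by
  induction l with
  | nil => rfl
  | cons x t ih =>
    by_cases hx : x ∈ p <;> simp [List.filterMap_cons, List.filter, hx, ih]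

theorem pv_step_iter (source : List Int) (k : Nat) :
    ∀ (l : List (List Int)), (pvStep source)^[k] l = l.flatMap (pvExt source k) := by
  induction k with
  | zero => intro l; simp [pvExt]
  | succ k ih =>
    intro l
    rw [Function.iterate_succ_apply, ih]
    unfold pvStep
    rw [List.flatMap_assoc]
    congr 1
    funext c
    rw [List.flatMap_map]
    rfl

theorem pv_alt_prefixes (e L : Int) :
    ((PySem.List.pyRange 0 L 1).foldl
        (fun ps _ => ps.flatMap (fun p =>
          (PySem.List.pyRange 0 e 1).filterMap (fun s => if s ∈ p then none else some (p ++ [s]))))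
        [[]])
      = pvExt (PySem.List.pyRange 0 e 1) (L - 0).toNat [] := by
  have hstep : (fun (ps : List (List Int)) (_ : Int) => ps.flatMap (fun p =>
      (PySem.List.pyRange 0 e 1).filterMap (fun s => if s ∈ p then none else some (p ++ [s]))))
      = fun ps _ => pvStep (PySem.List.pyRange 0 e 1) ps := by
    funext ps x
    unfold pvStep
    congr 1
    funext p
    exact pv_filterMap_if p _
  rw [hstep, pv_foldl_const_iter, PySem.List.length_pyRange_one, pv_step_iter]
  simp

theorem pv_ext_nil (r : Nat) (hr : 1 ≤ r) (c : List Int) : pvExt [] r c = [] := by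
  cases r with
  | zero => omega
  | succ r => simp [pvExt]

theorem pv_avail_nil (source : List Int) : pvAvail source [] = source.length := by
  simp [pvAvail]

theorem pv_good_eq : (fun p : List Int =>
    match PySem.List.pyGet? p 0, PySem.List.pyGet? p (-1) with
    | some a, some b => decide (a < b)
    | _, _ => false) = pvGood := rfl



theorem pv_A_main (e k : Int) (he : 0 ≤ e) (hk : 0 ≤ k) :
    permsA (PySem.List.pyRange 0 e 1) ((PySem.List.pyRange 0 e 1).length + 1) (e - k) [] []
      = (pvExt (PySem.List.pyRange 0 e 1) k.toNat []).filter pvGood := by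
  have hlen : (((PySem.List.pyRange 0 e 1).length : Nat) : Int) = e := by
    rw [PySem.List.length_pyRange_one]; omega
  have hA := pv_permsA_eq (PySem.List.pyRange 0 e 1) k.toNat [] []
      ((PySem.List.pyRange 0 e 1).length + 1) (by rw [pv_avail_nil]; omega)
  rw [show ((((PySem.List.pyRange 0 e 1).length : Nat) : Int) - ((k.toNat : Nat) : Int)) = e - k from by
    rw [hlen]; omega] at hA
  simpa using hA

theorem pv_A_nilsource (e k : Int) (hke : k ≠ e) (he : e < 0) :
    permsA ([] : List Int) (([] : List Int).length + 1) (e - k) [] [] = [] := by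
  by_cases hdone : 0 < e - k
  · exact pv_permsA_far _ _ _ _ _ (by simpa using hdone)
  · have h := pv_permsA_eq ([] : List Int) (k - e).toNat [] [] 1 (by simp [pvAvail])
    rw [show ((([] : List Int).length : Int) - (((k - e).toNat : Nat) : Int)) = e - k from by
      simp; omega] at h
    show permsA ([] : List Int) 1 (e - k) [] [] = []
    rw [h, pv_ext_nil _ (by omega)]
    rfl

theorem pv_ext_empty (source : List Int) :
    ∀ (r : Nat) (c : List Int), pvAvail source c < r → pvExt source r c = [] := by
  intro r
  induction r with
  | zero => intro c h; exact absurd h (Nat.not_lt_zero _)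
  | succ r ih =>
    intro c h
    show (source.filter (fun s => !decide (s ∈ c))).flatMap (fun s => pvExt source r (c ++ [s])) = []
    rw [List.flatMap_eq_nil_iff]
    intro s hs
    have hs' := List.mem_filter.mp hs
    have hsc : s ∉ c := by simpa using hs'.2
    apply ih
    have := pv_avail_lt hs'.1 hsc
    omega

theorem pv_altMain_eq (e L : Int) :
    permrangeAltMain e L
      = if L < 0 ∨ L > e then [] else (pvExt (PySem.List.pyRange 0 e 1) L.toNat []).filter pvGood := by
  unfold permrangeAltMain
  split
  · rfl
  · rw [pv_good_eq, pv_alt_prefixes, show L - 0 = L from by ring]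

-- ===== VERDICT (by name: the statement is the Claim_ definition above) =====
theorem permrange_spec : Claim_equal_permrange := by
  intro e n _dom hpre
  unfold Spec_permrange
  cases n with
  | none =>
    have he : 1 ≤ e := by
      by_contra h
      exact hpre (Or.inl ⟨rfl, by omega⟩)
    have hA : permrange e none
        = permsA (PySem.List.pyRange 0 e 1) ((PySem.List.pyRange 0 e 1).length + 1) 0 [] [] := by
      simp [permrange]
    have hB : permrange_alt e none = permrangeAltMain e e := by
      simp [permrange_alt]
    have hmain := pv_A_main e e (by omega) (by omega)
    rw [show e - e = (0 : Int) from by ring] at hmain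
    rw [hA, hB, hmain, pv_altMain_eq, if_neg (by omega)]
  | some k =>
    by_cases hk0 : k = 0
    · subst hk0; simp [permrange, permrange_alt]
    by_cases hk1 : k = 1
    · subst hk1
      have hA1 : permrange e (some 1) = (PySem.List.pyRange 0 e 1).foldl (fun I s => I ++ [[s]]) [] := by
        simp [permrange]
      have hB1 : permrange_alt e (some 1) = (PySem.List.pyRange 0 e 1).map (fun s => [s]) := by
        simp [permrange_alt]
      rw [hA1, hB1, PySem.List.foldl_append_singleton_eq_map]
      simp
    have hA : permrange e (some k)
        = permsA (PySem.List.pyRange 0 e 1) ((PySem.List.pyRange 0 e 1).length + 1) (e - k) [] [] := by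
      simp [permrange, hk0, hk1]
    have hB : permrange_alt e (some k) = permrangeAltMain e k := by
      simp [permrange_alt, hk0, hk1]
    rw [hA, hB, pv_altMain_eq]
    by_cases hcond : k < 0 ∨ k > e
    · rw [if_pos hcond]
      by_cases hee : 0 ≤ e
      · have hlen : (((PySem.List.pyRange 0 e 1).length : Nat) : Int) = e := by
          rw [PySem.List.length_pyRange_one]; omega
        rcases hcond with hkneg | hke2
        · exact pv_permsA_far _ _ _ _ _ (by omega)
        · rw [pv_A_main e k hee (by omega),
            pv_ext_empty _ _ _ (by rw [pv_avail_nil]; omega)]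
          rfl
      · have hsrc : PySem.List.pyRange 0 e 1 = [] := PySem.List.pyRange_one_eq_nil (by omega)
        have hke : k ≠ e := fun h => hpre (Or.inr ⟨by rw [h], by omega⟩)
        rw [hsrc]
        exact pv_A_nilsource e k hke (by omega)
    · rw [if_neg hcond]
      push_neg at hcond
      exact pv_A_main e k (by omega) (by omega)
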